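-- pv_equiv track=rewrite | github.com/Jack-Frings/advent_of_code | 2024/02/reports.py | line_safe
-- ===== SOURCE A (Python) =====
-- def line_safe(line):
--     safe = True
--     if line != sorted(line) and line != sorted(line, reverse=True):
--         safe = False
--     for index in range(len(line)-1):
--         if not (3 >= abs(int(line[index]) - int(line[index+1])) >= 1):
--             safe = False
--     return safe
-- ===== SOURCE B (Python) =====
-- def line_safe(line):
--     inc = True
--     dec = True
--     for a, b in zip(line, line[1:]):
--         d = b - a
--         if not (1 <= d <= 3):
--             inc = False
--         if not (-3 <= d <= -1):
--             dec = False
--     return inc or dec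
-- ===== Notes on version B (the rewrite author's own statement) =====
-- stated objective: faster
-- what changed: Replaced the two full sorts plus a separate index loop by a single linear pass over adjacent pairs that tracks whether every step is an ascending step of 1..3 or every step is a descending step of 1..3.
import Mathlib
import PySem

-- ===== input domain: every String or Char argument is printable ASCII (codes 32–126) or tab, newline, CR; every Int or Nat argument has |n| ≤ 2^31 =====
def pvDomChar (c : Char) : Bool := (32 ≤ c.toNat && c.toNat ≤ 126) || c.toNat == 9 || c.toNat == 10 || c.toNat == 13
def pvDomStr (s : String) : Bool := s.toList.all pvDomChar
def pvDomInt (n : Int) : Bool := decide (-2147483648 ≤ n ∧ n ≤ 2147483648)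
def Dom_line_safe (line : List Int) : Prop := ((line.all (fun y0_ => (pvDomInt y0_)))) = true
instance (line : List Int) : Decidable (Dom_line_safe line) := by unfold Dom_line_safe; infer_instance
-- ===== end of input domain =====

-- B replaces the two sorts plus an index loop by one linear pass over adjacent pairs
-- tracking whether the line is consistently ascending/descending with steps of 1..3 (objective: faster).

-- ===== PORT A =====
def line_safe (line : List Int) : Bool :=
  let safe := true
  let safe := if line ≠ PySem.List.sorted line (fun x => x) false ∧
                 line ≠ PySem.List.sorted line (fun x => x) true then false else safe
  -- indices produced by range(len(line)-1) are always in bounds, so pyGet? is some; .getD 0 only unwraps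
  (PySem.List.pyRange 0 ((line.length : Int) - 1) 1).foldl (fun safe index =>
      let d := (PySem.List.pyGet? line index).getD 0 - (PySem.List.pyGet? line (index + 1)).getD 0
      if ¬ (3 ≥ |d| ∧ |d| ≥ 1) then false else safe) safe

-- ===== PORT B =====
def line_safe_alt (line : List Int) : Bool :=
  let p := (line.zip (PySem.List.slice line (some 1) none)).foldl
    (fun (s : Bool × Bool) ab =>
      let d := ab.2 - ab.1
      (if ¬ (1 ≤ d ∧ d ≤ 3) then false else s.1,
       if ¬ (-3 ≤ d ∧ d ≤ -1) then false else s.2))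
    (true, true)
  p.1 || p.2

-- ===== PRECONDITION & SPEC =====
def Spec_line_safe (line : List Int) (out : Bool) : Prop := out = line_safe_alt line
instance (line : List Int) (out : Bool) : Decidable (Spec_line_safe line out) := by unfold Spec_line_safe; infer_instance

-- ===== CLAIM (what is proved, stated in full; the proofs are below) =====
def Claim_equal_line_safe : Prop := ∀ (line : List Int), Dom_line_safe line → Spec_line_safe line (line_safe line)

-- ===== LEMMAS AND PROOFS =====

theorem foldA_eq_all (l : List Int) (p : Int → Prop) [DecidablePred p] (init : Bool) :
    l.foldl (fun s x => if ¬ p x then false else s) init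
      = (init && l.all (fun x => decide (p x))) := by
  induction l generalizing init with
  | nil => simp
  | cons a t ih =>
      rw [List.foldl_cons, ih]
      by_cases h : p a <;> simp [h]

theorem foldB_eq_all (l : List (Int × Int)) (p q : Int × Int → Prop)
    [DecidablePred p] [DecidablePred q] (i1 i2 : Bool) :
    l.foldl (fun (s : Bool × Bool) ab =>
        (if ¬ p ab then false else s.1, if ¬ q ab then false else s.2)) (i1, i2)
      = (i1 && l.all (fun ab => decide (p ab)), i2 && l.all (fun ab => decide (q ab))) := by
  induction l generalizing i1 i2 with
  | nil => simp
  | cons a t ih =>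
      rw [List.foldl_cons, ih]
      by_cases h1 : p a <;> by_cases h2 : q a <;> simp [h1, h2]

theorem zip_all_eq_chain' (P : Int → Int → Prop) [DecidableRel P] (l : List Int) :
    (l.zip l.tail).all (fun ab => decide (P ab.1 ab.2)) = decide (l.IsChain P) := by
  induction l with
  | nil => simp
  | cons a t ih =>
      cases t with
      | nil => simp
      | cons b u =>
          simp only [List.tail_cons, List.zip_cons_cons, List.all_cons] at *
          rw [ih]
          by_cases h : P a b <;> simp [h, List.isChain_cons_cons]

theorem sorted_asc_iff (l : List Int) :
    l = PySem.List.sorted l (fun x => x) false ↔ l.IsChain (· ≤ ·) := by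
  constructor
  · intro h
    have hp := PySem.List.sorted_pairwise l (fun x => x)
    rw [← h] at hp
    exact hp.isChain
  · intro h
    have hp : l.Pairwise (fun a b => (a : Int) ≤ b) := List.isChain_iff_pairwise.mp h
    exact (PySem.List.sorted_eq_self_of_pairwise l (fun x => x) hp).symm

theorem sorted_desc_iff (l : List Int) :
    l = PySem.List.sorted l (fun x => x) true ↔ l.IsChain (fun a b => b ≤ a) := by
  constructor
  · intro h
    have hp := PySem.List.sorted_pairwise_rev l (fun x => x)
    rw [← h] at hp
    exact hp.isChain
  · intro h
    haveI : Trans (fun a b : Int => b ≤ a) (fun a b : Int => b ≤ a) (fun a b : Int => b ≤ a) :=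
      ⟨fun h1 h2 => le_trans h2 h1⟩
    have hp : l.Pairwise (fun a b => (b : Int) ≤ a) := List.isChain_iff_pairwise.mp h
    exact (PySem.List.sorted_rev_eq_self_of_pairwise l (fun x => x) hp).symm

-- A's loop part as an all over adjacent indices, turned into a chain
theorem range_all_eq_chain' (l : List Int) (P : Int → Int → Prop) [DecidableRel P] :
    ((PySem.List.pyRange 0 ((l.length : Int) - 1) 1).all (fun i =>
        decide (P ((PySem.List.pyGet? l i).getD 0) ((PySem.List.pyGet? l (i + 1)).getD 0))))
      = decide (l.IsChain P) := by
  rw [PySem.List.pyRange_one]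
  have hlen : (((l.length : Int) - 1) - 0).toNat = l.length - 1 := by omega
  rw [hlen, List.all_map]
  rw [Bool.eq_iff_iff]
  simp only [List.all_eq_true, Function.comp_apply, decide_eq_true_eq]
  have key : ∀ (i : ℕ) (hi : i + 1 < l.length),
      ((PySem.List.pyGet? l ((0 : Int) + (i : Nat))).getD 0 = l[i]'(by omega) ∧
       (PySem.List.pyGet? l ((0 : Int) + (i : Nat) + 1)).getD 0 = l[i + 1]'(by omega)) := by
    intro i hi
    constructor
    · have h : (0 : Int) + (i : Nat) = (i : Nat) := by omega
      rw [h, PySem.List.pyGet?_natCast]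
      simp [List.getElem?_eq_getElem (by omega : i < l.length)]
    · have h : (0 : Int) + (i : Nat) + 1 = ((i + 1 : Nat) : Int) := by omega
      rw [h, PySem.List.pyGet?_natCast]
      simp [List.getElem?_eq_getElem (by omega : i + 1 < l.length)]
  rw [List.isChain_iff_getElem (R := P) (l := l)]
  constructor
  · intro h i hi
    have hm := h i (List.mem_range.mpr (by omega))
    rcases key i hi with ⟨h0, h1⟩
    rw [h0, h1] at hm
    exact hm
  · intro h i hi
    have hi' : i < l.length - 1 := List.mem_range.mp hi
    rcases key i (by omega) with ⟨h0, h1⟩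
    rw [h0, h1]
    exact h i (by omega)

-- the propositional heart: A's condition equals B's condition
theorem main_iff (l : List Int) :
    ((l.IsChain (· ≤ ·) ∨ l.IsChain (fun a b => b ≤ a)) ∧
        l.IsChain (fun a b => 3 ≥ |a - b| ∧ |a - b| ≥ 1))
      ↔ (l.IsChain (fun a b => 1 ≤ b - a ∧ b - a ≤ 3) ∨
         l.IsChain (fun a b => -3 ≤ b - a ∧ b - a ≤ -1)) := by
  simp only [List.isChain_iff_getElem]
  constructor
  · rintro ⟨hdir, habs⟩
    rcases hdir with hle | hge
    · left
      intro i hi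
      have h1 := hle i hi
      have h2 := habs i hi
      rcases abs_cases (l[i] - l[i + 1]) with ⟨he, _⟩ | ⟨he, _⟩ <;> rw [he] at h2 <;> omega
    · right
      intro i hi
      have h1 := hge i hi
      have h2 := habs i hi
      rcases abs_cases (l[i] - l[i + 1]) with ⟨he, _⟩ | ⟨he, _⟩ <;> rw [he] at h2 <;> omega
  · rintro (h | h)
    · refine ⟨Or.inl fun i hi => by have := h i hi; omega, fun i hi => ?_⟩
      have := h i hi
      rcases abs_cases (l[i] - l[i + 1]) with ⟨he, _⟩ | ⟨he, _⟩ <;> rw [he] <;> omega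
    · refine ⟨Or.inr fun i hi => by have := h i hi; omega, fun i hi => ?_⟩
      have := h i hi
      rcases abs_cases (l[i] - l[i + 1]) with ⟨he, _⟩ | ⟨he, _⟩ <;> rw [he] <;> omega

-- ===== VERDICT(by name: the statement is the Claim_ definition above) =====
theorem line_safe_spec : Claim_equal_line_safe := by
  intro line _
  unfold Spec_line_safe line_safe line_safe_alt
  rw [PySem.List.slice_from_one]
  rw [foldA_eq_all (PySem.List.pyRange 0 ((line.length : Int) - 1) 1) (fun index =>
        3 ≥ |(PySem.List.pyGet? line index).getD 0 - (PySem.List.pyGet? line (index + 1)).getD 0| ∧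
        |(PySem.List.pyGet? line index).getD 0 - (PySem.List.pyGet? line (index + 1)).getD 0| ≥ 1)]
  rw [foldB_eq_all (line.zip line.tail)
        (fun ab => 1 ≤ ab.2 - ab.1 ∧ ab.2 - ab.1 ≤ 3)
        (fun ab => -3 ≤ ab.2 - ab.1 ∧ ab.2 - ab.1 ≤ -1)]
  rw [Bool.true_and, Bool.true_and]
  rw [zip_all_eq_chain' (fun a b => 1 ≤ b - a ∧ b - a ≤ 3)]
  rw [zip_all_eq_chain' (fun a b => -3 ≤ b - a ∧ b - a ≤ -1)]
  rw [range_all_eq_chain' line (fun a b => 3 ≥ |a - b| ∧ |a - b| ≥ 1)]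
  rw [Bool.eq_iff_iff]
  simp only [Bool.and_eq_true, Bool.or_eq_true, decide_eq_true_eq]
  constructor
  · rintro ⟨hb, hq⟩
    by_cases hne : line ≠ PySem.List.sorted line (fun x => x) false ∧
        line ≠ PySem.List.sorted line (fun x => x) true
    · rw [if_pos hne] at hb
      exact absurd hb (by simp)
    · push_neg at hne
      have hdir : line.IsChain (· ≤ ·) ∨ line.IsChain (fun a b => b ≤ a) := by
        rcases Classical.em (line = PySem.List.sorted line (fun x => x) false) with hA | hA
        · exact Or.inl ((sorted_asc_iff line).mp hA)
        · exact Or.inr ((sorted_desc_iff line).mp (hne hA))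
      exact (main_iff line).mp ⟨hdir, hq⟩
  · intro h
    have hm := (main_iff line).mpr h
    have hnotne : ¬ (line ≠ PySem.List.sorted line (fun x => x) false ∧
        line ≠ PySem.List.sorted line (fun x => x) true) := by
      rintro ⟨h1, h2⟩
      rcases hm.1 with h' | h'
      · exact h1 ((sorted_asc_iff line).mpr h')
      · exact h2 ((sorted_desc_iff line).mpr h')
    rw [if_neg hnotne]
    exact ⟨rfl, hm.2⟩
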